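-- pv_equiv track=rewrite | github.com/mohisyed/school | cmsc201/final/jumnle.py | jumble
-- ===== SOURCE A (Python) =====
-- def jumble(astring,a ,b):
--     L = len(astring)
--     final_word_list = []
--     some_string = ""
--     for i in range(L):
--         formula = (a * i + b) % len(astring)    # the formula
--         if formula not in final_word_list:
--             final_word_list.append(formula)      # appends to the list
--             some_string += astring[formula]     # adds it to the string
--     return some_string
-- ===== SOURCE B (Python) =====
-- def jumble(astring, a, b):
--     # Number theory: (a*i+b) % L repeats with period L // gcd(a, L), and the
--     # first period's values are pairwise distinct, so no dedup is needed.
--     L = len(astring)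
--     if L == 0:
--         return ""
--     x, y = abs(a), L
--     while y:
--         x, y = y, x % y
--     p = L // x
--     return ''.join(astring[(a * i + b) % L] for i in range(p))
-- ===== Notes on version B (the rewrite author's own statement) =====
-- stated objective: faster
-- what changed: Replaces A's dedup loop (membership test against the list of indices already emitted) by a number-theoretic closed form: (a*i+b) % L is periodic with period p = L // gcd(a, L) and its first p values are pairwise distinct, so B computes gcd by Euclid's algorithm and joins exactly the first p characters with no duplicate tracking at all.
import Mathlib
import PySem

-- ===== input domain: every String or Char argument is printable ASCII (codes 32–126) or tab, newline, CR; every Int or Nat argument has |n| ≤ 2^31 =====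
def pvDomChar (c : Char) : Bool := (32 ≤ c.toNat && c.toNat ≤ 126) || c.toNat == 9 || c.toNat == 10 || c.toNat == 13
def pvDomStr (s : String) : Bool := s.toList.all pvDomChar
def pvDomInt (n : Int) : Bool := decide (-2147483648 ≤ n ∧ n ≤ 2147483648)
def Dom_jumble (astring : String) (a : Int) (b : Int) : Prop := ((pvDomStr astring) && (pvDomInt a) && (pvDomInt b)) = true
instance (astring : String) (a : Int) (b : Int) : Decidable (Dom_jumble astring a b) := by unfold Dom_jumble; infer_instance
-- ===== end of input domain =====

-- B drops A's dedup loop entirely: (a*i+b) % L is periodic with period L // gcd(a, L) and the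
-- first period's values are pairwise distinct, so B emits exactly that many characters (alternative).

-- ===== PORT A =====
-- astring[formula] is ported via Str.pyGet?; the index is (a*i+b) % L with 0 < L, so it is
-- always in range and the .getD "" default is never taken (exact).
def jumble (astring : String) (a : Int) (b : Int) : String :=
  let L : Int := PySem.Str.len astring
  ((PySem.List.pyRange 0 L 1).foldl
    (fun (st : List Int × String) i =>
      let formula := PySem.Int.mod (a * i + b) L
      if formula ∈ st.1 then st
      else (st.1 ++ [formula], st.2 ++ ((PySem.Str.pyGet? astring formula).map String.singleton).getD ""))
    ([], "")).2

-- ===== PORT B =====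
-- Source B's hand-written Euclid while-loop: x, y = y, x % y until y == 0 (Python % = PySem.Int.mod).
def euclidLoop (x y : Int) : Int :=
  if y = 0 then x
  else euclidLoop y (PySem.Int.mod x y)
termination_by y.natAbs
decreasing_by
  rename_i h
  rcases lt_or_gt_of_ne h with hneg | hpos
  · have h1 := PySem.Int.mod_neg_bounds x hneg
    omega
  · have h1 := PySem.Int.mod_nonneg x hpos
    have h2 := PySem.Int.mod_lt x hpos
    omega

def jumble_alt (astring : String) (a : Int) (b : Int) : String :=
  let L : Int := PySem.Str.len astring
  if L = 0 then ""
  else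
    let g := euclidLoop |a| L
    let p := PySem.Int.floordiv L g
    ((PySem.List.pyRange 0 p 1).map
      (fun i => ((PySem.Str.pyGet? astring (PySem.Int.mod (a * i + b) L)).map String.singleton).getD "")).foldl
      (· ++ ·) ""

-- ===== PRECONDITION & SPEC =====
def Spec_jumble (astring : String) (a : Int) (b : Int) (out : String) : Prop := out = jumble_alt astring a b
instance (astring : String) (a : Int) (b : Int) (out : String) : Decidable (Spec_jumble astring a b out) := by unfold Spec_jumble; infer_instance

-- ===== CLAIM (what is proved, stated in full; the proofs are below) =====
def Claim_equal_jumble : Prop := ∀ (astring : String) (a : Int) (b : Int), Dom_jumble astring a b → Spec_jumble astring a b (jumble astring a b)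

-- ===== LEMMAS AND PROOFS =====

theorem euclid_eq_gcd (x y : Int) (hx : 0 ≤ x) (hy : 0 ≤ y) : euclidLoop x y = (Int.gcd x y : Int) := by
  rw [euclidLoop]
  by_cases h : y = 0
  · simp [h, Int.gcd, Int.natAbs_of_nonneg hx]
  · have hpos : 0 < y := lt_of_le_of_ne hy (Ne.symm h)
    rw [if_neg h, euclid_eq_gcd y (PySem.Int.mod x y) hy (PySem.Int.mod_nonneg x hpos)]
    rw [PySem.Int.mod_eq_emod_of_pos hpos, Int.gcd_comm y (x % y), Int.gcd_emod]
termination_by y.natAbs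
decreasing_by
  have h1 := PySem.Int.mod_nonneg x (by omega : (0:Int) < y)
  have h2 := PySem.Int.mod_lt x (by omega : (0:Int) < y)
  omega

-- the index formula
def fIdx (a b L i : Int) : Int := PySem.Int.mod (a * i + b) L

theorem fIdx_eq_iff (a b L i j : Int) (hL : 0 < L) :
    fIdx a b L i = fIdx a b L j ↔ L ∣ a * (j - i) := by
  unfold fIdx
  rw [PySem.Int.mod_eq_emod_of_pos hL, PySem.Int.mod_eq_emod_of_pos hL]
  constructor
  · intro h
    have hm : (a * i + b) ≡ (a * j + b) [ZMOD L] := h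
    have hd := Int.ModEq.dvd hm
    have : (a * j + b) - (a * i + b) = a * (j - i) := by ring
    rwa [this] at hd
  · intro h
    have : L ∣ (a * j + b) - (a * i + b) := by
      have e : (a * j + b) - (a * i + b) = a * (j - i) := by ring
      rwa [e]
    exact Int.modEq_of_dvd this

-- period P = N / gcd(a, N), for string length N
def perOf (a : Int) (N : Nat) : Nat := N / Int.gcd a N

theorem gcd_pos_of (a : Int) (N : Nat) (hN : 0 < N) : 0 < Int.gcd a (N : Int) := by
  have : (N : Int) ≠ 0 := by exact_mod_cast hN.ne'
  exact Int.gcd_pos_of_ne_zero_right a this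

theorem gcd_dvd_len (a : Int) (N : Nat) : Int.gcd a (N : Int) ∣ N := by
  have h := Int.gcd_dvd_right (a := a) (b := (N : Int))
  have : ((Int.gcd a (N : Int) : Nat) : Int) ∣ (N : Int) := h
  exact_mod_cast this

theorem perOf_pos (a : Int) (N : Nat) (hN : 0 < N) : 0 < perOf a N := by
  unfold perOf
  exact Nat.div_pos (Nat.le_of_dvd hN (gcd_dvd_len a N)) (gcd_pos_of a N hN)

theorem perOf_le (a : Int) (N : Nat) : perOf a N ≤ N := Nat.div_le_self _ _

theorem per_mul_gcd (a : Int) (N : Nat) : perOf a N * Int.gcd a (N : Int) = N := by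
  unfold perOf
  exact Nat.div_mul_cancel (gcd_dvd_len a N)

-- L divides a * P
theorem dvd_a_mul_per (a : Int) (N : Nat) :
    (N : Int) ∣ a * (perOf a N : Int) := by
  have hga : ((Int.gcd a (N : Int) : Nat) : Int) ∣ a := Int.gcd_dvd_left a (N : Int)
  have hPG : ((perOf a N : Nat) : Int) * ((Int.gcd a (N : Int) : Nat) : Int) = (N : Int) := by
    exact_mod_cast congrArg (Nat.cast : Nat → Int) (per_mul_gcd a N)
  refine ⟨a / ((Int.gcd a (N : Int) : Nat) : Int), ?_⟩
  have h1 : a / ((Int.gcd a (N : Int) : Nat) : Int) * ((Int.gcd a (N : Int) : Nat) : Int) = a :=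
    Int.ediv_mul_cancel hga
  calc a * (perOf a N : Int)
      = (a / ((Int.gcd a (N : Int) : Nat) : Int) * ((Int.gcd a (N : Int) : Nat) : Int)) * (perOf a N : Int) := by rw [h1]
    _ = (((perOf a N : Nat) : Int) * ((Int.gcd a (N : Int) : Nat) : Int)) * (a / ((Int.gcd a (N : Int) : Nat) : Int)) := by ring
    _ = (N : Int) * (a / ((Int.gcd a (N : Int) : Nat) : Int)) := by rw [hPG]

-- repetition: shifting the argument by P does not change the index
theorem fIdx_shift (a b : Int) (N : Nat) (hN : 0 < N) (i : Int) :
    fIdx a b (N : Int) (i + (perOf a N : Int)) = fIdx a b (N : Int) i := by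
  have hL : (0:Int) < (N : Int) := by exact_mod_cast hN
  rw [fIdx_eq_iff a b _ _ _ hL]
  have h := (dvd_a_mul_per a N).neg_right
  have e : a * (i - (i + (perOf a N : Int))) = -(a * (perOf a N : Int)) := by ring
  rwa [e]

-- distinctness within the first period
theorem fIdx_inj (a b : Int) (N : Nat) (hN : 0 < N) (i j : Nat)
    (hij : j < i) (hi : i < perOf a N) :
    fIdx a b (N : Int) (i : Int) ≠ fIdx a b (N : Int) (j : Int) := by
  intro h
  have hL : (0:Int) < (N : Int) := by exact_mod_cast hN
  rw [fIdx_eq_iff a b _ _ _ hL] at h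
  -- h : (N:Int) ∣ a * ((j:Int) - i); pass to d = i - j > 0
  have h' : (N : Int) ∣ a * ((i : Int) - (j : Int)) := by
    have := h.neg_right
    have e : -(a * ((j:Int) - (i:Int))) = a * ((i:Int) - (j:Int)) := by ring
    rwa [e] at this
  set G : Nat := Int.gcd a (N : Int) with hG
  have hg0 : 0 < G := gcd_pos_of a N hN
  have hga : ((G : Nat) : Int) ∣ a := hG ▸ Int.gcd_dvd_left a (N : Int)
  set a' : Int := a / (G : Int) with ha'
  have ha : (G : Int) * a' = a := by
    rw [ha', mul_comm]
    exact Int.ediv_mul_cancel hga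
  set P : Nat := perOf a N with hP
  have hNP : (N : Int) = (P : Int) * (G : Int) := by
    exact_mod_cast (congrArg (Nat.cast : Nat → Int) (per_mul_gcd a N)).symm
  -- cancel G
  have hPd : (P : Int) ∣ a' * ((i : Int) - (j : Int)) := by
    obtain ⟨k, hk⟩ := h'
    refine ⟨k, ?_⟩
    have hGne : (G : Int) ≠ 0 := by exact_mod_cast hg0.ne'
    apply mul_left_cancel₀ hGne
    calc (G:Int) * (a' * ((i:Int) - (j:Int))) = a * ((i:Int) - (j:Int)) := by rw [← ha]; ring
      _ = (N : Int) * k := hk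
      _ = (G:Int) * ((P:Int) * k) := by rw [hNP]; ring
  -- coprimality of P and a'
  have hcop : Nat.Coprime (a.natAbs / G) (N / G) := by
    have : G = Nat.gcd a.natAbs N := by
      rw [hG]; simp [Int.gcd]
    rw [this]
    exact Nat.coprime_div_gcd_div_gcd (this ▸ hg0)
  have ha'abs : a'.natAbs = a.natAbs / G := by
    rw [ha']
    rw [Int.natAbs_ediv_of_dvd hga]
    simp
  have hgcd1 : Int.gcd (P : Int) a' = 1 := by
    have : Int.gcd (P : Int) a' = Nat.gcd P a'.natAbs := by simp [Int.gcd]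
    rw [this, ha'abs, hP]
    unfold perOf
    rw [← hG]
    exact Nat.Coprime.symm hcop
  have hcopI : IsCoprime ((P : Nat) : Int) a' := Int.isCoprime_iff_gcd_eq_one.mpr hgcd1
  have hPdvd : ((P : Nat) : Int) ∣ ((i : Int) - (j : Int)) := by
    apply hcopI.dvd_of_dvd_mul_right
    rwa [mul_comm] at hPd
  have hlt : (i : Int) - (j : Int) < (P : Int) := by
    have : (i : Int) < (P : Int) := by exact_mod_cast hi
    omega
  have hpos : (0:Int) < (i : Int) - (j : Int) := by
    have : (j : Int) < (i : Int) := by exact_mod_cast hij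
    omega
  have := Int.le_of_dvd hpos hPdvd
  omega

-- every index value occurs within the first period
theorem fIdx_mem (a b : Int) (N : Nat) (hN : 0 < N) (n : Nat) :
    fIdx a b (N : Int) (n : Int) ∈
      (PySem.List.pyRange 0 ((perOf a N : Nat) : Int) 1).map (fun i => fIdx a b (N : Int) i) := by
  by_cases h : n < perOf a N
  · exact List.mem_map.mpr ⟨(n : Int), (PySem.List.mem_pyRange_one).mpr ⟨by positivity, by exact_mod_cast h⟩, rfl⟩
  · have hrec := fIdx_mem a b N hN (n - perOf a N)
    have he : fIdx a b (N : Int) (n : Int) = fIdx a b (N : Int) ((n - perOf a N : Nat) : Int) := by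
      have := fIdx_shift a b N hN ((n - perOf a N : Nat) : Int)
      have hcast : ((n - perOf a N : Nat) : Int) + ((perOf a N : Nat) : Int) = (n : Int) := by
        have := le_of_not_gt h
        omega
      rwa [hcast] at this
    rwa [he]
termination_by n
decreasing_by
  have hP := perOf_pos a N hN
  omega

-- A's dedup loop, generically: with distinctness in [0,P) and repetition beyond,
-- after n steps the state is exactly the first (min n P) entries
theorem loopGen (f : Int → Int) (g : Int → String) (P : Nat)
    (hdist : ∀ i j : Nat, j < i → i < P → f (i : Int) ≠ f (j : Int))
    (hmem : ∀ n : Nat, f (n : Int) ∈ (PySem.List.pyRange 0 (P : Int) 1).map (fun i => f i)) :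
    ∀ n : Nat,
      (PySem.List.pyRange 0 (n : Int) 1).foldl
        (fun (st : List Int × String) i => if f i ∈ st.1 then st else (st.1 ++ [f i], st.2 ++ g (f i)))
        (([] : List Int), "")
      = ((PySem.List.pyRange 0 ((min n P : Nat) : Int) 1).map (fun i => f i),
         ((PySem.List.pyRange 0 ((min n P : Nat) : Int) 1).map (fun i => g (f i))).foldl (· ++ ·) "") := by
  intro n
  induction n with
  | zero => simp
  | succ n ih =>
    have hsplit : PySem.List.pyRange 0 ((n + 1 : Nat) : Int) 1
        = PySem.List.pyRange 0 (n : Int) 1 ++ [(n : Int)] := by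
      push_cast
      exact PySem.List.pyRange_one_succ_right (by positivity)
    rw [hsplit, List.foldl_append, ih]
    by_cases hn : n < P
    · have hmin : min n P = n := Nat.min_eq_left (le_of_lt hn)
      have hmin' : min (n + 1) P = n + 1 := Nat.min_eq_left hn
      have hnotmem : f (n : Int) ∉ (PySem.List.pyRange 0 ((min n P : Nat) : Int) 1).map (fun i => f i) := by
        rw [hmin]
        intro hmem'
        obtain ⟨j, hj, hje⟩ := List.mem_map.mp hmem'
        obtain ⟨hj0, hjn⟩ := (PySem.List.mem_pyRange_one).mp hj
        have hjnat : j = ((j.toNat : Nat) : Int) := by omega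
        have : f (n : Int) = f ((j.toNat : Nat) : Int) := by rw [← hjnat]; exact hje.symm
        exact hdist n j.toNat (by omega) hn this
      simp only [List.foldl, if_neg hnotmem]
      have hsplit' : PySem.List.pyRange 0 ((min (n+1) P : Nat) : Int) 1
          = PySem.List.pyRange 0 ((min n P : Nat) : Int) 1 ++ [(n : Int)] := by
        rw [hmin, hmin']
        push_cast
        exact PySem.List.pyRange_one_succ_right (by positivity)
      rw [hsplit', List.map_append, List.map_append, List.foldl_append]
      simp
    · have hmin : min n P = P := Nat.min_eq_right (le_of_not_gt hn)
      have hmin' : min (n + 1) P = P := Nat.min_eq_right (by omega)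
      have hmem' : f (n : Int) ∈ (PySem.List.pyRange 0 ((min n P : Nat) : Int) 1).map (fun i => f i) := by
        rw [hmin]; exact hmem n
      simp only [List.foldl, hmin, hmin']
      rw [if_pos (hmem n)]

-- ===== VERDICT (by name: the statement is the Claim_ definition above) =====
theorem jumble_spec : Claim_equal_jumble := by
  intro astring a b _
  unfold Spec_jumble jumble jumble_alt
  have hlen : PySem.Str.len astring = ((astring.toList.length : Nat) : Int) := PySem.Str.len_eq astring
  rw [hlen]
  set N : Nat := astring.toList.length with hNdef
  by_cases hN : N = 0
  · simp [hN]
  · have hN0 : 0 < N := Nat.pos_of_ne_zero hN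
    have hLne : ((N : Int)) ≠ 0 := by exact_mod_cast hN
    rw [if_neg hLne]
    -- identify B's p with the period
    have hgcd : euclidLoop |a| (N : Int) = (Int.gcd a (N : Int) : Int) := by
      rw [euclid_eq_gcd |a| (N : Int) (abs_nonneg a) (by positivity)]
      congr 1
      simp [Int.gcd, Int.natAbs_abs]
    have hgpos : (0:Int) < (Int.gcd a (N : Int) : Int) := by exact_mod_cast gcd_pos_of a N hN0
    have hp : PySem.Int.floordiv (N : Int) (euclidLoop |a| (N : Int)) = ((perOf a N : Nat) : Int) := by
      rw [hgcd, PySem.Int.floordiv_eq_ediv_of_pos hgpos]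
      rw [show ((perOf a N : Nat) : Int) = ((N / Int.gcd a (N : Int) : Nat) : Int) from rfl]
      rw [Int.natCast_ediv]
    have hloop := loopGen (fIdx a b (N : Int))
      (fun i => ((PySem.Str.pyGet? astring i).map String.singleton).getD "")
      (perOf a N)
      (fun i j hij hi => fIdx_inj a b N hN0 i j hij hi)
      (fun n => fIdx_mem a b N hN0 n)
      N
    have hminNP : min N (perOf a N) = perOf a N := Nat.min_eq_right (perOf_le a N)
    rw [hminNP] at hloop
    simp only [fIdx] at hloop
    simp only [hp]
    exact congrArg Prod.snd hloop
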